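-- pv_equiv track=rewrite | github.com/roryeiffe/Adent-of-Code | test.py | return_count
-- ===== SOURCE A (Python) =====
-- def return_count(number):
-- 	L = []
-- 	for item in range(number):
-- 		L.append(item+1)
--
--
-- 	count = 0
-- 	for i in range(len(L)):
-- 		for j in range(len(L) + 1):
-- 			if j > i:
-- 				count += len(L[i:j])
-- 	return count
-- ===== SOURCE B (Python) =====
-- def return_count(number):
--     # Closed form: sum over 0 <= i < j <= n of (j - i) has the closed form below.
--     if number <= 0:
--         return 0
--     return number * (number + 1) * (number + 2) // 6
-- ===== Notes on version B (the rewrite author's own statement) =====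
-- stated objective: faster
-- what changed: Replaced the list-building triple loop (two index loops plus a slice whose length is recomputed) by the closed-form product of three consecutive integers divided by six.
import Mathlib
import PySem

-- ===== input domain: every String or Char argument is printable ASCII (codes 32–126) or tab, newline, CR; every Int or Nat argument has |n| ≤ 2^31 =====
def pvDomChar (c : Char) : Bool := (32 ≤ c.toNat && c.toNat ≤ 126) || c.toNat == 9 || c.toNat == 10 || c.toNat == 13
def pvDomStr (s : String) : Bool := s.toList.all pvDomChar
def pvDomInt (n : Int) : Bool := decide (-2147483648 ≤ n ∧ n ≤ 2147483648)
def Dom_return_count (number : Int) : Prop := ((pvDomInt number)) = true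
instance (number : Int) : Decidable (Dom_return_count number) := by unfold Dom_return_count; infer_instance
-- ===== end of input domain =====

-- B replaces A's O(n^3) triple loop (build the list, then sum slice lengths over index pairs)
-- by the closed-form value n*(n+1)*(n+2)//6; return values are proved equal for every Int input.

-- ===== PORT A =====
def return_count (number : Int) : Int :=
  let L : List Int := (PySem.List.pyRange 0 number 1).foldl (fun acc item => acc ++ [item + 1]) []
  let count : Int :=
    (PySem.List.pyRange 0 (L.length : Int) 1).foldl (fun count i =>
      (PySem.List.pyRange 0 ((L.length : Int) + 1) 1).foldl (fun count j =>
        if j > i then count + ((PySem.List.slice L (some i) (some j)).length : Int) else count)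
        count) 0
  count

-- ===== PORT B =====
def return_count_alt (number : Int) : Int :=
  if number ≤ 0 then 0
  else PySem.Int.floordiv (number * (number + 1) * (number + 2)) 6

-- ===== PRECONDITION & SPEC =====
def Spec_return_count (number : Int) (out : Int) : Prop := out = return_count_alt number
instance (number : Int) (out : Int) : Decidable (Spec_return_count number out) := by unfold Spec_return_count; infer_instance

-- ===== CLAIM (what is proved, stated in full; the proofs are below) =====
def Claim_equal_return_count : Prop := ∀ (number : Int), Dom_return_count number → Spec_return_count number (return_count number)

-- ===== LEMMAS AND PROOFS =====

/-- Sum 1 + 2 + … + t, the value of A's inner loop for a slice span of `t`. -/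
def pvInnerS (t : Nat) : Int := ((List.range t).map (fun (k : Nat) => (k : Int) + 1)).sum

theorem pv_two_innerS (t : Nat) : 2 * pvInnerS t = t * (t + 1) := by
  induction t with
  | zero => simp [pvInnerS]
  | succ t ih =>
      unfold pvInnerS at *
      -- peel the last element of the range
      rw [List.range_succ, List.map_append, List.sum_append]
      push_cast
      simp only [List.map_cons, List.map_nil, List.sum_cons, List.sum_nil]
      linear_combination ih

theorem pv_key (M : Nat) :
    6 * ((List.range M).map (fun k => pvInnerS (M - k))).sum
      = (M : Int) * ((M : Int) + 1) * ((M : Int) + 2) := by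
  induction M with
  | zero => simp
  | succ M ih =>
      rw [List.range_succ_eq_map, List.map_cons, List.sum_cons, List.map_map]
      have h1 : ((List.range M).map ((fun k => pvInnerS (M + 1 - k)) ∘ (fun i => i + 1)))
          = (List.range M).map (fun k => pvInnerS (M - k)) := by
        apply List.map_congr_left
        intro k _
        show pvInnerS (M + 1 - (k + 1)) = pvInnerS (M - k)
        congr 1
        omega
      rw [h1]
      have h2 := pv_two_innerS (M + 1)
      push_cast at h2 ⊢
      linear_combination 3 * h2 + ih

theorem pv_inner_eq (L : List Int) (m : Nat) (hL : L.length = m) (i : Int)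
    (hi0 : 0 ≤ i) (him : i < (m : Int)) (c : Int) :
    (PySem.List.pyRange 0 ((m : Int) + 1) 1).foldl (fun count j =>
        if j > i then count + ((PySem.List.slice L (some i) (some j)).length : Int) else count) c
      = c + pvInnerS (m - i.toNat) := by
  have hstep : (fun (count : Int) (j : Int) =>
        if j > i then count + ((PySem.List.slice L (some i) (some j)).length : Int) else count)
      = fun count j => count + (if i < j then ((PySem.List.slice L (some i) (some j)).length : Int) else 0) := by
    funext count j
    by_cases h : i < j <;> simp [h]
  rw [hstep, PySem.List.foldl_add]
  congr 1
  rw [PySem.List.pyRange_one_append 0 (i + 1) ((m : Int) + 1) (by omega) (by omega),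
      List.map_append, List.sum_append]
  have hz : ((PySem.List.pyRange 0 (i + 1) 1).map
      (fun j => if i < j then ((PySem.List.slice L (some i) (some j)).length : Int) else 0)).sum = 0 := by
    apply List.sum_eq_zero
    intro x hx
    rcases List.mem_map.mp hx with ⟨j, hj, rfl⟩
    rw [PySem.List.mem_pyRange_one] at hj
    simp [show ¬ i < j by omega]
  rw [hz, zero_add]
  have hlen : ∀ j : Int, i < j → j ≤ (m : Int) →
      ((PySem.List.slice L (some i) (some j)).length : Int) = j - i := by
    intro j hij hjm
    rw [PySem.List.slice_toNat L hi0 (by omega)]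
    simp only [List.length_take, List.length_drop, hL]
    omega
  have hcong : ((PySem.List.pyRange (i + 1) ((m : Int) + 1) 1).map
      (fun j => if i < j then ((PySem.List.slice L (some i) (some j)).length : Int) else 0)).sum
      = ((PySem.List.pyRange (i + 1) ((m : Int) + 1) 1).map (fun j => j - i)).sum := by
    congr 1
    apply List.map_congr_left
    intro j hj
    rw [PySem.List.mem_pyRange_one] at hj
    rw [if_pos (by omega), hlen j (by omega) (by omega)]
  rw [hcong, PySem.List.pyRange_one, List.map_map]
  have ht : (((m : Int) + 1) - (i + 1)).toNat = m - i.toNat := by omega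
  rw [ht]
  unfold pvInnerS
  congr 1
  apply List.map_congr_left
  intro k _
  show (i + 1 + (k : Int)) - i = (k : Int) + 1
  ring

theorem pv_count_eq (n : Int) :
    return_count n = ((List.range n.toNat).map (fun k => pvInnerS (n.toNat - k))).sum := by
  dsimp only [return_count]
  rw [PySem.List.foldl_append_singleton_eq_map]
  have hL : (([] : List Int) ++ (PySem.List.pyRange 0 n 1).map (fun item => item + 1)).length = n.toNat := by
    simp [PySem.List.length_pyRange_one]
  rw [hL]
  refine (PySem.List.foldl_congr_mem
      (g := fun (c : Int) (i : Int) => c + pvInnerS (n.toNat - i.toNat)) _ _ _ ?_).trans ?_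
  · intro acc i hi
    rw [PySem.List.mem_pyRange_one] at hi
    exact pv_inner_eq _ n.toNat hL i hi.1 (by omega) acc
  rw [PySem.List.foldl_add, zero_add]
  rw [PySem.List.pyRange_one, List.map_map]
  have hnn : (((n.toNat : Int)) - 0).toNat = n.toNat := by omega
  rw [hnn]
  refine congrArg List.sum ?_
  apply List.map_congr_left
  intro k _
  show pvInnerS (n.toNat - ((0 : Int) + (k : Int)).toNat) = pvInnerS (n.toNat - k)
  congr 1
  omega

-- ===== VERDICT (by name: the statement is the Claim_ definition above) =====
theorem return_count_spec : Claim_equal_return_count := by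
  intro n _
  unfold Spec_return_count return_count_alt
  by_cases hn : n ≤ 0
  · rw [if_pos hn]
    dsimp only [return_count]
    rw [PySem.List.pyRange_one_eq_nil (by omega : n ≤ 0)]
    simp [PySem.List.pyRange_one_eq_nil]
  · rw [if_neg hn]
    have hkey := pv_key n.toNat
    have hcast : ((n.toNat : Int)) = n := by omega
    rw [hcast] at hkey
    rw [pv_count_eq n]
    rw [eq_comm, PySem.Int.floordiv_eq_iff_of_pos (by omega)]
    constructor <;> linarith [hkey]
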